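-- pv_equiv track=rewrite | github.com/Mahir101/Streamlit-Mongo-Auth-ML-Ops | streamlit_login_auth_mongo/utils.py | non_empty_str_check
-- ===== SOURCE A (Python) =====
-- def non_empty_str_check(username_sign_up: str) -> bool:
--     """
--     Checks for non-empty strings.
--     """
--     empty_count = 0
--     for i in username_sign_up:
--         if i == ' ':
--             empty_count = empty_count + 1
--             if empty_count == len(username_sign_up):
--                 return False
--
--     if not username_sign_up:
--         return False
--     return True
-- ===== SOURCE B (Python) =====
-- def non_empty_str_check(username_sign_up: str) -> bool:
--     """
--     Checks for non-empty strings.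
--     """
--     return username_sign_up.strip(' ') != ''
-- ===== Notes on version B (the rewrite author's own statement) =====
-- stated objective: simpler
-- what changed: Replaced the explicit per-character space-counting loop with early return by a single trim-then-compare: strip(' ') != ''.
import Mathlib
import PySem

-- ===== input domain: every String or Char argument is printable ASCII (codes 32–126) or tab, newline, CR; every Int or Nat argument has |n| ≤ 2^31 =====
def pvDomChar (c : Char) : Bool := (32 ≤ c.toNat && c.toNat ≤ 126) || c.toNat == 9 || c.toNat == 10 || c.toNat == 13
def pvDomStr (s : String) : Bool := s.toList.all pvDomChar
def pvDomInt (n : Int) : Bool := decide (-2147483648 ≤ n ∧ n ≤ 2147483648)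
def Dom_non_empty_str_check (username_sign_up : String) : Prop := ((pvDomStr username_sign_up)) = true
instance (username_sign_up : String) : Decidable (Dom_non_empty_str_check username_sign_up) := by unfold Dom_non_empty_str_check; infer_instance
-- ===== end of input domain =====

-- ===== PORT A =====
-- loop of A: counter of spaces with early `return False` when the counter reaches len
def pvLoopA (len : Nat) : List Char → Nat → Option Bool
  | [], _ => none
  | c :: rest, cnt =>
    if c = ' ' then
      if cnt + 1 = len then some false else pvLoopA len rest (cnt + 1)
    else pvLoopA len rest cnt

def non_empty_str_check (username_sign_up : String) : Bool :=
  match pvLoopA username_sign_up.toList.length username_sign_up.toList 0 with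
  | some b => b
  | none => if username_sign_up.toList = [] then false else true

-- ===== PORT B =====
def non_empty_str_check_alt (username_sign_up : String) : Bool :=
  PySem.Str.stripChars username_sign_up " " != ""

-- ===== PRECONDITION & SPEC =====
def Spec_non_empty_str_check (username_sign_up : String) (out : Bool) : Prop := out = non_empty_str_check_alt username_sign_up
instance (username_sign_up : String) (out : Bool) : Decidable (Spec_non_empty_str_check username_sign_up out) := by unfold Spec_non_empty_str_check; infer_instance

-- ===== CLAIM (what is proved, stated in full; the proofs are below) =====
def Claim_equal_non_empty_str_check : Prop := ∀ (username_sign_up : String), Dom_non_empty_str_check username_sign_up → Spec_non_empty_str_check username_sign_up (non_empty_str_check username_sign_up)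

-- ===== LEMMAS AND PROOFS =====

-- ===== VERDICT (by name: the statement is the Claim_ definition above) =====
theorem pvLoopA_eq (len : Nat) (l : List Char) (cnt : Nat)
    (h : cnt + l.length ≤ len) :
    pvLoopA len l cnt =
      if (∀ x ∈ l, x = ' ') ∧ l ≠ [] ∧ cnt + l.length = len then some false else none := by
  induction l generalizing cnt with
  | nil => simp [pvLoopA]
  | cons c rest ih =>
    simp only [List.length_cons] at h
    simp only [pvLoopA, List.length_cons]
    by_cases hc : c = ' '
    · subst hc
      rw [if_pos rfl]
      by_cases hl : cnt + 1 = len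
      · have hrest : rest = [] := List.eq_nil_of_length_eq_zero (by omega)
        subst hrest
        simp [hl]
      · rw [if_neg hl, ih (cnt + 1) (by omega)]
        by_cases hall : ∀ x ∈ rest, x = ' '
        · by_cases hlen : cnt + 1 + rest.length = len
          · have hr : rest ≠ [] := by
              intro e; subst e; simp only [List.length_nil] at hlen; omega
            rw [if_pos ⟨hall, hr, hlen⟩, if_pos]
            refine ⟨?_, by simp, by omega⟩
            intro x hx
            rcases List.mem_cons.mp hx with h1 | h2
            · exact h1
            · exact hall x h2
          · rw [if_neg, if_neg]
            · rintro ⟨-, -, h3⟩; omega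
            · rintro ⟨-, -, h3⟩; omega
        · rw [if_neg, if_neg]
          · rintro ⟨h1, -, -⟩
            exact hall fun x hx => h1 x (List.mem_cons_of_mem _ hx)
          · rintro ⟨h1, -, -⟩; exact hall h1
    · rw [if_neg hc, ih cnt (by omega)]
      rw [if_neg, if_neg]
      · rintro ⟨h1, -, -⟩
        exact hc (h1 _ List.mem_cons_self)
      · rintro ⟨-, h2, h3⟩; omega

theorem pvDropWhile_space (l : List Char) :
    (∀ x ∈ List.dropWhile (fun c => decide (c = ' ')) l, x = ' ') ↔ ∀ x ∈ l, x = ' ' := by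
  induction l with
  | nil => simp
  | cons c rest ih =>
    by_cases hc : c = ' '
    · subst hc; simpa [List.dropWhile_cons] using ih
    · simp [hc]

theorem non_empty_str_check_spec : Claim_equal_non_empty_str_check := by
  intro s _
  unfold Spec_non_empty_str_check non_empty_str_check non_empty_str_check_alt
  rw [pvLoopA_eq _ _ _ (by omega)]
  have hkey : PySem.Str.stripChars s " " = "" ↔ ∀ x ∈ s.toList, x = ' ' := by
    rw [← String.toList_inj]
    simp [PySem.Chars.stripChars]
    exact pvDropWhile_space s.toList
  by_cases hall : ∀ x ∈ s.toList, x = ' '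
  · rw [hkey.mpr hall]
    simp only [bne_self_eq_false]
    by_cases hnil : s.toList = []
    · rw [if_neg (by rintro ⟨-, h2, -⟩; exact h2 hnil)]
      simp [hnil]
    · rw [if_pos ⟨hall, hnil, by omega⟩]
  · have hne : PySem.Str.stripChars s " " ≠ "" := fun h => hall (hkey.mp h)
    rw [if_neg (by rintro ⟨h1, -, -⟩; exact hall h1)]
    have hnil : s.toList ≠ [] := by
      push Not at hall
      obtain ⟨x, hx, -⟩ := hall
      intro e; rw [e] at hx; simp at hx
    simp [hnil, bne_iff_ne, hne]
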